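-- pv_equiv track=rewrite | github.com/hisakaz0/py-utils | pyutils.py | maximum_rectangle
-- ===== SOURCE A (Python) =====
-- import math
--
-- def maximum_rectangle(l):
--     if (l==0):
--         return 0
--     lim = math.ceil(math.sqrt(l)) + 1
--     min_leng, min_a, min_b= l+1, 1, l
--     for a in range(1, lim):
--         if (l%a != 0):
--             continue
--         b = l//a
--         leng = a + b
--         if (min_leng > leng):
--             min_leng = leng
--             min_a, min_b = a, b
--     return min_a, min_b
-- ===== SOURCE B (Python) =====
-- import math
--
-- def maximum_rectangle(l):
--     if l == 0:
--         return 0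
--     a = math.isqrt(l)
--     while l % a != 0:
--         a -= 1
--     return a, l // a
-- ===== Notes on version B (the rewrite author's own statement) =====
-- stated objective: alternative
-- what changed: B computes the floor square root with math.isqrt and scans downward from it, returning the FIRST divisor found (early exit), instead of A's upward scan over all candidates up to ceil(sqrt(l))+1 that tracks a running minimum of a+l//a.
-- outside the precondition, e.g. on maximum_rectangle(0): A returns 0, B returns 0
import Mathlib
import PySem

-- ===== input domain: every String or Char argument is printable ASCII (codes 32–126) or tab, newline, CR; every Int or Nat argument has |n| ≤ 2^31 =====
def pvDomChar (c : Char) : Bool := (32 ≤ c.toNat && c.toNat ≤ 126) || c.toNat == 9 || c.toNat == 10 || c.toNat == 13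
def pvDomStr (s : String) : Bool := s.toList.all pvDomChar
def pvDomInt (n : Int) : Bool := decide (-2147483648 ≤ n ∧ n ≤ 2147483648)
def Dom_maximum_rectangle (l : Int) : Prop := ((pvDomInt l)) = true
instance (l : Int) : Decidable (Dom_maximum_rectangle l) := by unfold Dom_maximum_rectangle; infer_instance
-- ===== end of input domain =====

-- B scans downward from math.isqrt(l) and returns the first divisor found, instead of A's
-- upward scan over all candidates that tracks a running minimum of a + l//a (alternative).

-- ===== PORT A =====
-- math.ceil(math.sqrt(l)) ported by hand as the exact integer ceiling square root; this is
-- exact on the admitted domain 1 ≤ l ≤ 2^31, where the float sqrt is accurate enough that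
-- its ceiling equals the ceiling of the real square root.
def pvCeilSqrtN (l : Int) : Nat :=
  let s := Nat.sqrt l.toNat
  if s * s = l.toNat then s else s + 1

-- the body of A's for-loop, over the state (min_leng, min_a, min_b)
def pvStepA (l : Int) (st : Int × Int × Int) (a : Int) : Int × Int × Int :=
  if PySem.Int.mod l a ≠ 0 then st
  else
    let b := PySem.Int.floordiv l a
    let leng := a + b
    if st.1 > leng then (leng, a, b) else st

def maximum_rectangle (l : Int) : Int × Int :=
  if l = 0 then (0, 0)  -- Python returns the bare int 0 here (not a pair); excluded by Pre_
  else
    let lim : Int := (pvCeilSqrtN l : Int) + 1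
    let st := (PySem.List.pyRange 1 lim 1).foldl (pvStepA l) (l + 1, 1, l)
    (st.2.1, st.2.2)

-- ===== PORT B =====
-- the 'while l % a != 0: a -= 1' loop, as structural recursion on the Nat counter a
def pvFindDiv (l : Int) : Nat → Nat
  | 0 => 0  -- never reached for 1 ≤ l (Python would raise ZeroDivisionError)
  | n + 1 => if PySem.Int.mod l ((n : Int) + 1) = 0 then n + 1 else pvFindDiv l n

def maximum_rectangle_alt (l : Int) : Int × Int :=
  if l = 0 then (0, 0)  -- Python returns the bare int 0 here (not a pair); excluded by Pre_
  else
    let a : Int := (pvFindDiv l (Nat.sqrt l.toNat) : Int)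
    (a, PySem.Int.floordiv l a)

-- ===== PRECONDITION & SPEC =====
-- Pre_ excludes l == 0, where A returns the bare int 0 rather than a pair of ints,
-- and l < 0, where math.sqrt raises ValueError.
def Pre_maximum_rectangle (l : Int) : Prop := 1 ≤ l
instance (l : Int) : Decidable (Pre_maximum_rectangle l) := by unfold Pre_maximum_rectangle; infer_instance
def pvWitness_maximum_rectangle : Int := 12

def Spec_maximum_rectangle (l : Int) (out : Int × Int) : Prop := out = maximum_rectangle_alt l
instance (l : Int) (out : Int × Int) : Decidable (Spec_maximum_rectangle l out) := by unfold Spec_maximum_rectangle; infer_instance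

-- ===== CLAIM (what is proved, stated in full; the proofs are below) =====
def Claim_equal_maximum_rectangle : Prop := ∀ (l : Int), Dom_maximum_rectangle l → Pre_maximum_rectangle l → Spec_maximum_rectangle l (maximum_rectangle l)

-- ===== LEMMAS AND PROOFS =====

-- pvFindDiv returns a positive divisor of l that is at most m
theorem pvFindDiv_spec (l : Int) (m : Nat) (hm : 1 ≤ m) :
    1 ≤ pvFindDiv l m ∧ pvFindDiv l m ≤ m ∧ ((pvFindDiv l m : Int)) ∣ l := by
  induction m with
  | zero => omega
  | succ n ih =>
    rw [pvFindDiv]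
    split
    · rename_i h
      refine ⟨by omega, le_refl _, ?_⟩
      exact_mod_cast (PySem.Int.mod_eq_zero_iff_dvd l _).1 h
    · rename_i h
      rcases Nat.eq_zero_or_pos n with hn | hn
      · subst hn
        exact absurd ((PySem.Int.mod_eq_zero_iff_dvd l 1).2 (one_dvd l)) (by simpa using h)
      · obtain ⟨h1, h2, h3⟩ := ih hn
        exact ⟨h1, by omega, h3⟩

-- pvFindDiv returns the GREATEST divisor ≤ m
theorem pvFindDiv_max (l : Int) (m k : Nat) (hk : 1 ≤ k) (hkm : k ≤ m) (hd : (k : Int) ∣ l) :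
    k ≤ pvFindDiv l m := by
  induction m with
  | zero => omega
  | succ n ih =>
    rw [pvFindDiv]
    split
    · omega
    · rename_i h
      rcases Nat.lt_or_ge k (n + 1) with hlt | hge
      · exact ih (by omega)
      · have : k = n + 1 := by omega
        subst this
        exact absurd ((PySem.Int.mod_eq_zero_iff_dvd l _).2 (by exact_mod_cast hd)) h

-- a + l/a is strictly decreasing on divisors whose product stays below l
theorem sigma_lt (l d a : Int) (hd : 0 < d) (hda : d < a)
    (hdl : d ∣ l) (hal : a ∣ l) (hprod : d * a < l) :
    a + l / a < d + l / d := by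
  have ha : 0 < a := by omega
  obtain ⟨p, hp⟩ := hdl
  obtain ⟨q, hq⟩ := hal
  have hpd : l / d = p := by rw [hp]; exact Int.mul_ediv_cancel_left p (by omega)
  have hqa : l / a = q := by rw [hq]; exact Int.mul_ediv_cancel_left q (by omega)
  rw [hpd, hqa]
  by_contra hcon
  rw [not_lt] at hcon
  have hq' : d * p = a * q := by rw [← hp, hq]
  have h3 : (p - q) * (d * a) = (a - d) * l := by rw [hp]; linear_combination d * hq'
  have h1 : (p - q) * (d * a) ≤ (a - d) * (d * a) :=
    mul_le_mul_of_nonneg_right (by omega) (by positivity)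
  have h2 : (a - d) * (d * a) < (a - d) * l :=
    mul_lt_mul_of_pos_left hprod (by omega)
  omega

-- the loop body, reduced to a divisibility case split
theorem pvStepA_eq (l : Int) (st : Int × Int × Int) (a : Int) (ha : 0 < a) :
    pvStepA l st a = if a ∣ l then
        (if st.1 > a + l / a then (a + l / a, a, l / a) else st) else st := by
  by_cases h : a ∣ l
  · have hm : PySem.Int.mod l a = 0 := (PySem.Int.mod_eq_zero_iff_dvd l a).2 h
    simp [pvStepA, hm, h, PySem.Int.floordiv_eq_ediv_of_pos ha]
  · have hm : PySem.Int.mod l a ≠ 0 := fun hc => h ((PySem.Int.mod_eq_zero_iff_dvd l a).1 hc)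
    simp [pvStepA, hm, h]

-- the loop invariant: after processing a = 1..m the state is (d + l/d, d, l/d) with
-- d the greatest divisor of l among 1..min m (isqrt l)
theorem foldA_inv (l : Int) (hl : 1 ≤ l) (m : Nat) (hm : 1 ≤ m) :
    (PySem.List.pyRange 1 ((m : Int) + 1) 1).foldl (pvStepA l) (l + 1, 1, l)
      = (((pvFindDiv l (min m (Nat.sqrt l.toNat)) : Int)) + l / (pvFindDiv l (min m (Nat.sqrt l.toNat)) : Int),
         (pvFindDiv l (min m (Nat.sqrt l.toNat)) : Int),
         l / (pvFindDiv l (min m (Nat.sqrt l.toNat)) : Int)) := by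
  set s := Nat.sqrt l.toNat with hs
  have hln : (l.toNat : Int) = l := Int.toNat_of_nonneg (by omega)
  have hs1 : 1 ≤ s := by
    have := (Nat.sqrt_pos (n := l.toNat)).2 (by omega)
    omega
  have hssl : (s : Int) * s ≤ l := by
    have h : s * s ≤ l.toNat := by simpa [Nat.pow_two] using Nat.sqrt_le' l.toNat
    have : ((s * s : Nat) : Int) ≤ (l.toNat : Int) := by exact_mod_cast h
    push_cast at this; omega
  have hlss : l < ((s : Int) + 1) * ((s : Int) + 1) := by
    have h : l.toNat < (s + 1) * (s + 1) := by
      simpa [Nat.pow_two, Nat.succ_eq_add_one] using Nat.lt_succ_sqrt' l.toNat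
    have : ((l.toNat) : Int) < (((s + 1) * (s + 1) : Nat) : Int) := by exact_mod_cast h
    push_cast at this; omega
  induction m with
  | zero => omega
  | succ n ih =>
    rcases Nat.eq_zero_or_pos n with hn | hn
    · -- base case m = 1: only a = 1 is processed; it does not beat min_leng = l + 1
      subst hn
      have hfd : pvFindDiv l (min 1 s) = 1 := by
        have : min 1 s = 1 := by omega
        rw [this]
        simp [pvFindDiv]
      have hr : ((0 + 1 : Nat) : Int) + 1 = (1 : Int) + 1 := by norm_num
      rw [hr, PySem.List.pyRange_one_singleton]
      simp only [List.foldl_cons, List.foldl_nil]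
      rw [pvStepA_eq l _ 1 one_pos, if_pos (one_dvd l), hfd]
      simp
      omega
    · -- step: split off a = n + 1
      have hrec := ih hn
      have hcast : ((n + 1 : Nat) : Int) + 1 = ((n : Int) + 1) + 1 := by push_cast; ring
      rw [hcast, PySem.List.pyRange_one_succ_right (a := 1) (b := (n : Int) + 1) (by omega),
        List.foldl_append, hrec]
      simp only [List.foldl_cons, List.foldl_nil]
      rw [pvStepA_eq l _ ((n : Int) + 1) (by omega)]
      obtain ⟨hd1, hd2, hd3⟩ := pvFindDiv_spec l (min n s) (by omega)
      set d := pvFindDiv l (min n s) with hdd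
      by_cases hdvd : ((n : Int) + 1) ∣ l
      · rw [if_pos hdvd]
        rcases Nat.lt_or_ge n s with hns | hns
        · -- n+1 ≤ isqrt l: the new divisor strictly improves; the state updates
          have hmin : min n s = n := by omega
          have hup : (d : Int) + l / d > ((n : Int) + 1) + l / ((n : Int) + 1) := by
            apply sigma_lt l (d : Int) ((n : Int) + 1) (by exact_mod_cast hd1)
              (by rw [hmin] at hd2; exact_mod_cast Nat.lt_succ_of_le hd2) hd3 hdvd
            have hda : (d : Int) ≤ (s : Int) - 1 := by
              rw [hmin] at hd2
              omega
            have hna : ((n : Int) + 1) ≤ (s : Int) := by omega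
            nlinarith [hssl]
          rw [if_pos hup]
          have hfd : pvFindDiv l (min (n + 1) s) = n + 1 := by
            have : min (n + 1) s = n + 1 := by omega
            rw [this, pvFindDiv, if_pos ((PySem.Int.mod_eq_zero_iff_dvd l _).2 hdvd)]
          rw [hfd]
          push_cast
          ring_nf
        · -- n+1 > isqrt l: the mirror divisor l/(n+1) ≤ isqrt l already bounds the sum
          have hmin : min n s = s := by omega
          have hmin' : min (n + 1) s = s := by omega
          set a : Int := (n : Int) + 1 with hadef
          set b : Int := l / a with hbdef
          have hab : a * b = l := Int.mul_ediv_cancel' hdvd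
          have ha0 : 0 < a := by omega
          have hb0 : 0 < b := by nlinarith
          have has : (s : Int) + 1 ≤ a := by rw [hadef]; omega
          have hbs : b ≤ (s : Int) := by nlinarith
          have hbdvd : b ∣ l := ⟨a, by rw [← hab]; ring⟩
          have hbn : (b.toNat : Int) = b := Int.toNat_of_nonneg (by omega)
          have hbd : b ≤ (d : Int) := by
            rw [hmin] at hdd
            have := pvFindDiv_max l s b.toNat (by omega) (by omega) (by rw [hbn]; exact hbdvd)
            rw [← hdd] at this
            omega
          have hba : l / b = a := by rw [← hab, mul_comm]; exact Int.mul_ediv_cancel_left a (by omega)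
          have hno : (d : Int) + l / d ≤ a + l / a := by
            rcases eq_or_lt_of_le hbd with heq | hlt
            · rw [← heq, hba, ← hbdef]; omega
            · have := sigma_lt l b (d : Int) hb0 hlt hbdvd hd3 (by
                rw [hmin] at hd2
                have hds : (d : Int) ≤ (s : Int) := by exact_mod_cast hd2
                nlinarith)
              rw [hba] at this
              omega
          rw [if_neg (by omega), hmin']
          rw [hmin] at hdd
          rw [← hdd]
      · rw [if_neg hdvd]
        have hfd : pvFindDiv l (min (n + 1) s) = pvFindDiv l (min n s) := by
          rcases Nat.lt_or_ge n s with hns | hns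
          · have h1 : min (n + 1) s = n + 1 := by omega
            have h2 : min n s = n := by omega
            rw [h1, h2, pvFindDiv,
              if_neg (fun hc => hdvd ((PySem.Int.mod_eq_zero_iff_dvd l _).1 hc))]
          · have h1 : min (n + 1) s = s := by omega
            have h2 : min n s = s := by omega
            rw [h1, h2]
        rw [hfd]

-- ===== VERDICT (by name: the statement is the Claim_ definition above) =====
theorem maximum_rectangle_spec : Claim_equal_maximum_rectangle := by
  intro l _ hpre
  unfold Spec_maximum_rectangle maximum_rectangle maximum_rectangle_alt
  have hl : 1 ≤ l := hpre
  rw [if_neg (by omega), if_neg (by omega)]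
  have hs1 : 1 ≤ Nat.sqrt l.toNat := by
    have := (Nat.sqrt_pos (n := l.toNat)).2 (by omega)
    omega
  have hc : Nat.sqrt l.toNat ≤ pvCeilSqrtN l := by
    simp only [pvCeilSqrtN]
    split <;> omega
  have hmin : min (pvCeilSqrtN l) (Nat.sqrt l.toNat) = Nat.sqrt l.toNat := by omega
  have := foldA_inv l hl (pvCeilSqrtN l) (by omega)
  rw [hmin] at this
  obtain ⟨h1, _, _⟩ := pvFindDiv_spec l (Nat.sqrt l.toNat) hs1
  have hfd : PySem.Int.floordiv l ((pvFindDiv l (Nat.sqrt l.toNat) : Nat) : Int)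
      = l / ((pvFindDiv l (Nat.sqrt l.toNat) : Nat) : Int) :=
    PySem.Int.floordiv_eq_ediv_of_pos (by exact_mod_cast h1)
  simp only [this, hfd]
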